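-- pv_equiv track=rewrite | github.com/Just-gomin/Algorithm_Study | programmers/월간코드챌린지2/May/02.py | solution
-- ===== SOURCE A (Python) =====
-- def solution(numbers):
--     answer = []
--     for num in numbers:
--
--         if num < 7 :
--             answer.append(num+1)
--         else:
--             binN = str(format(num, "b"))
--
--             if binN == '1'*len(binN):
--                 answer.append(int("10" + "1"*(len(binN)-1), 2))
--             else:
--                 i = len(binN)-1
--                 while i > 0:
--                     tester =  binN[i - 1] + binN[i]
--                     if tester == "00" :
--                         temp = binN[:i-1] + "01" + binN[i+1:]
--                         answer.append(int(temp,2))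
--                         break
--                     elif tester == "01" :
--                         temp = binN[:i-1] + "10" + binN[i+1:]
--                         answer.append(int(temp,2))
--                         break
--                     elif tester == "10":
--                         temp = binN[0:i-1] + "11" + binN[i+1:]
--                         answer.append(int(temp,2))
--                         break
--                     i -= 1
--
--     return answer
-- ===== SOURCE B (Python) =====
-- def solution(numbers):
--     return [_next(num) for num in numbers]
--
--
-- def _next(num):
--     if num < 7 or num % 2 == 0:
--         return num + 1
--     # odd num >= 7: let t be the number of trailing 1-bits (t >= 1);
--     # the answer sets the lowest 0 bit and clears the bit below it,
--     # which is exactly num + 2**(t-1).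
--     return num + 2 ** (_trailing_ones(num) - 1)
--
--
-- def _trailing_ones(m):
--     t = 0
--     while m % 2 == 1:
--         m //= 2
--         t += 1
--     return t
-- ===== Notes on version B (the rewrite author's own statement) =====
-- stated objective: alternative
-- what changed: A formats each number as a binary string, scans adjacent digit pairs right-to-left with slicing, and re-parses the edited string with int(...,2); B uses no strings at all: it counts the trailing 1-bits arithmetically and adds 2**(t-1) (even or small numbers just get num+1).
import Mathlib
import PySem

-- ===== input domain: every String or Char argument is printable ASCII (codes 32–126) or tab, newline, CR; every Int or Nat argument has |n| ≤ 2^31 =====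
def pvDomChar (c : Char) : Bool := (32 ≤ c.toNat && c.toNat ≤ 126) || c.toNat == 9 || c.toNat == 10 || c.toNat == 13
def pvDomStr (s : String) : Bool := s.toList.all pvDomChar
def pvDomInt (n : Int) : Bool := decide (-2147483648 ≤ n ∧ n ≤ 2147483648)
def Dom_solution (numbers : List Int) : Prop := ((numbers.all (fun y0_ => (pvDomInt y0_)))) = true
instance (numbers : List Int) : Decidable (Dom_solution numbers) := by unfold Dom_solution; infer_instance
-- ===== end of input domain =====

-- B replaces A's binary-string formatting / pair scanning / slicing / int(.,2) re-parsing by pure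
-- integer arithmetic on the number (count trailing 1-bits, add 2^(t-1)): same result, no strings.


-- ===== PORT A =====
-- int(s, 2): hand port (PySem.Int.ofCharsBase?'s digit core is private and unusable in proofs);
-- exact on the nonempty '0'/'1'-only strings A builds here (no sign, space, underscore or 0b prefix).
def ofBin (cs : List Char) : Int := cs.foldl (fun a c => 2 * a + (if c = '1' then 1 else 0)) 0

-- the `while i > 0` scan of A: returns the value appended by the iteration that `break`s, none if i hits 0
def loopA (binN : List Char) : Nat → Option Int
  | 0 => none
  | j + 1 =>
    -- Python i = j+1; tester = binN[i-1] + binN[i]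
    match PySem.List.pyGet? binN (j : Int), PySem.List.pyGet? binN ((j : Int) + 1) with
    | some a, some b =>
      if a = '0' ∧ b = '0' then
        some (ofBin (PySem.List.slice binN none (some (j : Int)) ++ ['0', '1'] ++
                     PySem.List.slice binN (some ((j : Int) + 2)) none))
      else if a = '0' ∧ b = '1' then
        some (ofBin (PySem.List.slice binN none (some (j : Int)) ++ ['1', '0'] ++
                     PySem.List.slice binN (some ((j : Int) + 2)) none))
      else if a = '1' ∧ b = '0' then
        some (ofBin (PySem.List.slice binN none (some (j : Int)) ++ ['1', '1'] ++
                     PySem.List.slice binN (some ((j : Int) + 2)) none))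
      else loopA binN j
    | _, _ => none  -- IndexError; unreachable (indices are in range)

def solution (numbers : List Int) : List Int :=
  numbers.foldl (fun answer num =>
    if num < 7 then answer ++ [num + 1]
    else
      let binN := PySem.Int.toBinChars num   -- str(format(num, "b"))
      if binN = List.replicate binN.length '1' then
        answer ++ [ofBin ('1' :: '0' :: List.replicate (binN.length - 1) '1')]
      else
        match loopA binN (binN.length - 1) with
        | some v => answer ++ [v]
        | none => answer) []

-- ===== PORT B =====
-- the `while m % 2 == 1: m //= 2; t += 1` loop of Source B; entered only with m = num.toNat, num ≥ 7,
-- where Python's % and // on ints coincide with Nat's % and /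
def trailingOnes (m : Nat) : Nat :=
  if m % 2 = 1 then trailingOnes (m / 2) + 1 else 0
decreasing_by omega

def solution_alt (numbers : List Int) : List Int :=
  numbers.map (fun num =>
    if num < 7 ∨ PySem.Int.mod num 2 = 0 then num + 1
    else num + 2 ^ (trailingOnes num.toNat - 1))

-- ===== PRECONDITION & SPEC =====
def Spec_solution (numbers : List Int) (out : List Int) : Prop := out = solution_alt numbers
instance (numbers : List Int) (out : List Int) : Decidable (Spec_solution numbers out) := by unfold Spec_solution; infer_instance

-- ===== CLAIM (what is proved, stated in full; the proofs are below) =====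
def Claim_equal_solution : Prop := ∀ (numbers : List Int), Dom_solution numbers → Spec_solution numbers (solution numbers)

-- ===== LEMMAS AND PROOFS =====

def bin (n : Nat) : List Char :=
  if n = 0 then [] else bin (n / 2) ++ [if n % 2 = 1 then '1' else '0']
decreasing_by omega

theorem toDigits_eq_bin (n : Nat) (h : 0 < n) : Nat.toDigits 2 n = bin n := by
  induction n using Nat.strong_induction_on with
  | _ n ih =>
    rw [Nat.toDigits_eq_if (by norm_num), bin]
    by_cases h2 : n < 2
    · have h1 : n = 1 := by omega
      subst h1
      norm_num
      rw [bin]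
      rfl
    · rw [if_neg h2, if_neg (by omega)]
      rw [ih (n / 2) (by omega) (by omega)]
      congr 1
      rcases Nat.mod_two_eq_zero_or_one n with hm | hm <;> simp [hm] <;> rfl

theorem toBinChars_eq_bin (num : Int) (h : 7 ≤ num) :
    PySem.Int.toBinChars num = bin num.toNat := by
  rw [PySem.Int.toBinChars, if_neg (by omega)]
  exact toDigits_eq_bin num.toNat (by omega)

theorem ofBin_foldl (cs : List Char) (a : Int) :
    cs.foldl (fun a c => 2 * a + (if c = '1' then 1 else 0)) a
      = a * 2 ^ cs.length + ofBin cs := by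
  induction cs generalizing a with
  | nil => simp [ofBin]
  | cons c cs ih =>
      simp only [List.foldl_cons, List.length_cons, ofBin]
      rw [ih, ih (2 * 0 + _)]
      ring

theorem ofBin_append (xs ys : List Char) :
    ofBin (xs ++ ys) = ofBin xs * 2 ^ ys.length + ofBin ys := by
  rw [ofBin, List.foldl_append, ofBin_foldl]
  rfl

theorem ofBin_bin (n : Nat) : ofBin (bin n) = (n : Int) := by
  induction n using Nat.strong_induction_on with
  | _ n ih =>
    by_cases h0 : n = 0
    · subst h0; rw [bin]; rfl
    · rw [bin, if_neg h0, ofBin_append, ih (n / 2) (by omega)]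
      rcases Nat.mod_two_eq_zero_or_one n with hm | hm <;>
        simp [hm, ofBin] <;> omega

theorem ofBin_replicate (t : Nat) : ofBin (List.replicate t '1') = 2 ^ t - 1 := by
  induction t with
  | zero => rfl
  | succ t ih =>
      rw [List.replicate_succ', ofBin_append, ih]
      simp [ofBin]
      ring

theorem bin_ones (t a : Nat) : bin (a * 2 ^ t + (2 ^ t - 1)) = bin a ++ List.replicate t '1' := by
  induction t with
  | zero => simp
  | succ t ih =>
      have hp : 0 < 2 ^ t := Nat.two_pow_pos t
      have hq : a * 2 ^ (t + 1) = 2 * (a * 2 ^ t) := by ring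
      have hr : (2:Nat) ^ (t + 1) = 2 * 2 ^ t := by ring
      have he : a * 2 ^ (t + 1) + (2 ^ (t + 1) - 1) = 2 * (a * 2 ^ t + (2 ^ t - 1)) + 1 := by
        omega
      rw [he, bin, if_neg (by omega)]
      have h1 : (2 * (a * 2 ^ t + (2 ^ t - 1)) + 1) / 2 = a * 2 ^ t + (2 ^ t - 1) := by omega
      have h2 : (2 * (a * 2 ^ t + (2 ^ t - 1)) + 1) % 2 = 1 := by omega
      rw [h1, h2, ih, List.replicate_succ', List.append_assoc]
      rfl

theorem trailingOnes_ones (t m : Nat) (hm : m % 2 = 0) :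
    trailingOnes (m * 2 ^ t + (2 ^ t - 1)) = t := by
  induction t with
  | zero =>
      simp only [pow_zero, Nat.mul_one]
      rw [trailingOnes, if_neg (by omega)]
  | succ t ih =>
      have hp : 0 < 2 ^ t := Nat.two_pow_pos t
      have hq : m * 2 ^ (t + 1) = 2 * (m * 2 ^ t) := by ring
      have hr : (2:Nat) ^ (t + 1) = 2 * 2 ^ t := by ring
      have he : m * 2 ^ (t + 1) + (2 ^ (t + 1) - 1) = 2 * (m * 2 ^ t + (2 ^ t - 1)) + 1 := by
        omega
      rw [he, trailingOnes, if_pos (by omega)]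
      have h1 : (2 * (m * 2 ^ t + (2 ^ t - 1)) + 1) / 2 = m * 2 ^ t + (2 ^ t - 1) := by omega
      rw [h1, ih]

theorem odd_decomp (n : Nat) (h : n % 2 = 1) :
    ∃ t a, 0 < t ∧ a % 2 = 0 ∧ n = a * 2 ^ t + (2 ^ t - 1) := by
  induction n using Nat.strong_induction_on with
  | _ n ih =>
    have hk : n = 2 * (n / 2) + 1 := by omega
    by_cases hke : n / 2 % 2 = 0
    · exact ⟨1, n / 2, by norm_num, hke, by omega⟩
    · obtain ⟨t, a, ht, ha, hd⟩ := ih (n / 2) (by omega) (by omega)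
      refine ⟨t + 1, a, by omega, ha, ?_⟩
      have hp : 0 < 2 ^ t := Nat.two_pow_pos t
      have hq : a * 2 ^ (t + 1) = 2 * (a * 2 ^ t) := by ring
      have hr : (2:Nat) ^ (t + 1) = 2 * 2 ^ t := by ring
      omega

theorem cast_succ_nat (j : Nat) : ((j : Int) + 1) = ((j + 1 : Nat) : Int) := by push_cast; ring

theorem getElem?_tail_ones (p : List Char) (t k : Nat) (hk : 1 ≤ k) (hk2 : k ≤ t) :
    (p ++ '0' :: List.replicate t '1')[p.length + k]? = some '1' := by
  rw [List.getElem?_append_right (by omega)]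
  rw [show p.length + k - p.length = (k - 1) + 1 from by omega]
  simp [List.getElem?_replicate]
  omega

theorem loopA_skip (p : List Char) (t : Nat) (j : Nat) (hj : j + 1 ≤ t) :
    loopA (p ++ '0' :: List.replicate t '1') (p.length + 1 + j)
      = loopA (p ++ '0' :: List.replicate t '1') (p.length + 1) := by
  induction j with
  | zero => rfl
  | succ j ih =>
      rw [show p.length + 1 + (j + 1) = (p.length + 1 + j) + 1 from by omega, loopA]
      have hg1 : PySem.List.pyGet? (p ++ '0' :: List.replicate t '1')
          ((p.length + 1 + j : Nat) : Int) = some '1' := by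
        rw [PySem.List.pyGet?_natCast,
          show p.length + 1 + j = p.length + (1 + j) from by omega]
        exact getElem?_tail_ones p t (1 + j) (by omega) (by omega)
      have hg2 : PySem.List.pyGet? (p ++ '0' :: List.replicate t '1')
          (((p.length + 1 + j : Nat) : Int) + 1) = some '1' := by
        rw [cast_succ_nat, PySem.List.pyGet?_natCast,
          show p.length + 1 + j + 1 = p.length + (2 + j) from by omega]
        exact getElem?_tail_ones p t (2 + j) (by omega) (by omega)
      simp only [hg1, hg2]
      rw [if_neg (by decide), if_neg (by decide), if_neg (by decide)]
      exact ih (by omega)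

theorem loopA_fire (p : List Char) (t : Nat) (ht : 1 ≤ t) :
    loopA (p ++ '0' :: List.replicate t '1') (p.length + 1)
      = some (ofBin (p ++ '1' :: '0' :: List.replicate (t - 1) '1')) := by
  rw [loopA]
  have hg1 : PySem.List.pyGet? (p ++ '0' :: List.replicate t '1')
      ((p.length : Nat) : Int) = some '0' :=
    PySem.List.pyGet?_append_length p _ '0'
  have hg2 : PySem.List.pyGet? (p ++ '0' :: List.replicate t '1')
      (((p.length : Nat) : Int) + 1) = some '1' := by
    rw [cast_succ_nat, PySem.List.pyGet?_natCast]
    exact getElem?_tail_ones p t 1 le_rfl ht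
  simp only [hg1, hg2]
  rw [if_neg (by decide), if_pos (by decide)]
  rw [PySem.List.slice_to_natCast,
    show ((p.length : Int) + 2) = ((p.length + 2 : Nat) : Int) from by push_cast; ring,
    PySem.List.slice_from_natCast, List.take_left,
    show '0' :: List.replicate t '1' = '0' :: '1' :: List.replicate (t - 1) '1' from by
      rw [show t = (t - 1) + 1 from by omega]; rfl,
    show p ++ '0' :: '1' :: List.replicate (t - 1) '1'
        = (p ++ ['0', '1']) ++ List.replicate (t - 1) '1' from by simp,
    show p.length + 2 = (p ++ ['0', '1']).length from by simp,
    List.drop_left]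
  congr 1
  simp

theorem loopA_even (q : List Char) (c : Char) (hc : c = '0' ∨ c = '1') :
    loopA (q ++ [c, '0']) (q.length + 1) = some (ofBin (q ++ [c, '1'])) := by
  rw [loopA]
  have hg1 : PySem.List.pyGet? (q ++ [c, '0']) ((q.length : Nat) : Int) = some c :=
    PySem.List.pyGet?_append_length q _ c
  have hg2 : PySem.List.pyGet? (q ++ [c, '0']) (((q.length : Nat) : Int) + 1) = some '0' := by
    rw [cast_succ_nat, PySem.List.pyGet?_natCast,
      show q ++ [c, '0'] = (q ++ [c]) ++ ['0'] from by simp,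
      List.getElem?_append_right (by simp)]
    simp
  simp only [hg1, hg2]
  have hsl : PySem.List.slice (q ++ [c, '0']) none (some ((q.length : Nat) : Int)) = q := by
    rw [PySem.List.slice_to_natCast, List.take_left]
  have hsr : PySem.List.slice (q ++ [c, '0']) (some (((q.length : Nat) : Int) + 2)) none = [] := by
    rw [show ((q.length : Int) + 2) = ((q.length + 2 : Nat) : Int) from by push_cast; ring,
      PySem.List.slice_from_natCast,
      show q.length + 2 = (q ++ [c, '0']).length from by simp, List.drop_length]
  rcases hc with h | h <;> subst h
  · rw [if_pos (by decide), hsl, hsr]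
    simp
  · rw [if_neg (by decide), if_neg (by decide), if_pos (by decide), hsl, hsr]
    simp

theorem bin_zero : bin 0 = [] := by rw [bin]; rfl

theorem ofBin_head (x y : Char) (l : List Char) :
    ofBin (x :: y :: l) = ofBin ([x, y] ++ l) := rfl

theorem step_eq (answer : List Int) (num : Int) :
    (if num < 7 then answer ++ [num + 1]
     else
       let binN := PySem.Int.toBinChars num
       if binN = List.replicate binN.length '1' then
         answer ++ [ofBin ('1' :: '0' :: List.replicate (binN.length - 1) '1')]
       else
         match loopA binN (binN.length - 1) with
         | some v => answer ++ [v]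
         | none => answer)
      = answer ++ [if num < 7 ∨ PySem.Int.mod num 2 = 0 then num + 1
                   else num + 2 ^ (trailingOnes num.toNat - 1)] := by
  by_cases h7 : num < 7
  · rw [if_pos h7, if_pos (Or.inl h7)]
  · have h7' : (7 : Int) ≤ num := by omega
    have hn : num = (num.toNat : Int) := by omega
    have hmod : PySem.Int.mod num 2 = num % 2 := PySem.Int.mod_eq_emod_of_pos (by norm_num)
    rw [if_neg h7]
    simp only [toBinChars_eq_bin num h7']
    set n := num.toNat with hndef
    have hn7 : 7 ≤ n := by omega
    rcases Nat.mod_two_eq_zero_or_one n with hpar | hpar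
    · -- even: the scan fires at the last pair and returns n + 1
      have hb1 : bin n = bin (n / 2) ++ ['0'] := by
        rw [bin, if_neg (by omega)]; simp [hpar]
      have hb2 : bin (n / 2) = bin (n / 2 / 2) ++ [if n / 2 % 2 = 1 then '1' else '0'] := by
        rw [bin, if_neg (by omega)]
      set c := if n / 2 % 2 = 1 then '1' else '0' with hcdef
      have hc : c = '0' ∨ c = '1' := by
        rw [hcdef]; split_ifs <;> simp
      set q := bin (n / 2 / 2) with hqdef
      clear_value c q
      have hs : bin n = q ++ [c, '0'] := by rw [hb1, hb2]; simp
      have hne : ¬ (bin n = List.replicate (bin n).length '1') := by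
        rw [hs]
        intro he
        have h0 : ('0' : Char) ∈ q ++ [c, '0'] := by simp
        rw [he] at h0
        exact absurd (List.eq_of_mem_replicate h0) (by decide)
      rw [if_neg hne]
      have hlen : (bin n).length - 1 = q.length + 1 := by rw [hs]; simp
      rw [hlen, hs, loopA_even q c hc]
      have hv : ofBin (q ++ [c, '1']) = ofBin (q ++ [c, '0']) + 1 := by
        rcases hc with h | h <;> subst h <;>
          rw [ofBin_append, ofBin_append] <;>
          simp only [show ofBin ['0', '1'] = 1 from by decide,
            show ofBin ['0', '0'] = 0 from by decide, show ofBin ['1', '1'] = 3 from by decide,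
            show ofBin ['1', '0'] = 2 from by decide, List.length_cons, List.length_nil] <;>
          ring
      have hvn : ofBin (q ++ [c, '0']) = (n : Int) := by rw [← hs, ofBin_bin]
      have hm0 : PySem.Int.mod num 2 = 0 := by rw [hmod]; omega
      rw [if_pos (Or.inr hm0), hv, hvn, ← hn]
    · -- odd
      have hm1 : ¬ (num < 7 ∨ PySem.Int.mod num 2 = 0) := by
        rw [hmod]; omega
      rw [if_neg hm1]
      obtain ⟨t, a, ht, ha, hd⟩ := odd_decomp n hpar
      have htO : trailingOnes n = t := by rw [hd]; exact trailingOnes_ones t a ha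
      obtain ⟨t', rfl⟩ : ∃ t', t = t' + 1 := ⟨t - 1, by omega⟩
      have hbin : bin n = bin a ++ List.replicate (t' + 1) '1' := by
        rw [hd]; exact bin_ones _ a
      have hdz : (n : Int) = (a : Int) * 2 ^ (t' + 1) + (2 ^ (t' + 1) - 1) := by
        rw [hd]
        have h1 : (1 : Nat) ≤ 2 ^ (t' + 1) := Nat.one_le_two_pow
        push_cast [h1]
        ring
      by_cases ha0 : a = 0
      · -- all ones: 2^(t'+1) - 1
        subst ha0
        rw [bin_zero, List.nil_append] at hbin
        rw [hbin, if_pos (by simp)]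
        have hval : ofBin ('1' :: '0' :: List.replicate ((List.replicate (t' + 1) '1').length - 1) '1')
            = 2 * 2 ^ t' + (2 ^ t' - 1) := by
          rw [ofBin_head, List.length_replicate, Nat.add_sub_cancel, ofBin_append,
            ofBin_replicate, List.length_replicate, show ofBin ['1', '0'] = 2 from by decide]
        rw [hval, htO, Nat.add_sub_cancel]
        congr 1
        rw [hn, hdz]
        push_cast
        ring_nf
      · -- a even, a ≥ 2: the scan skips the trailing ones and fires at the '01' pair
        have hba : bin a = bin (a / 2) ++ ['0'] := by
          rw [bin, if_neg ha0]; simp [ha]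
        set p := bin (a / 2) with hpdef
        have hs : bin n = p ++ '0' :: List.replicate (t' + 1) '1' := by
          rw [hbin, hba]; simp
        have hne : ¬ (bin n = List.replicate (bin n).length '1') := by
          rw [hs]
          intro he
          have h0 : ('0' : Char) ∈ p ++ '0' :: List.replicate (t' + 1) '1' := by simp
          rw [he] at h0
          exact absurd (List.eq_of_mem_replicate h0) (by decide)
        rw [if_neg hne]
        have hlen : (bin n).length - 1 = p.length + 1 + t' := by rw [hs]; simp; omega
        rw [hlen, hs, loopA_skip p (t' + 1) t' le_rfl, loopA_fire p (t' + 1) (by omega),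
          Nat.add_sub_cancel]
        have hofp : ofBin p = ((a / 2 : Nat) : Int) := by rw [hpdef, ofBin_bin]
        have hval : ofBin (p ++ '1' :: '0' :: List.replicate t' '1')
            = ofBin p * 2 ^ (t' + 2) + (2 * 2 ^ t' + (2 ^ t' - 1)) := by
          rw [show p ++ '1' :: '0' :: List.replicate t' '1'
                = (p ++ ['1', '0']) ++ List.replicate t' '1' from by simp,
            ofBin_append, ofBin_append, ofBin_replicate, List.length_replicate,
            show ofBin ['1', '0'] = 2 from by decide]
          simp only [List.length_cons, List.length_nil]
          ring
        simp only [hval, hofp, htO, Nat.add_sub_cancel]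
        congr 1
        have ha2 : (a : Int) = 2 * ((a / 2 : Nat) : Int) := by omega
        rw [show num = (n : Int) from hn, hdz, ha2]
        push_cast
        ring_nf

-- ===== VERDICT (by name: the statement is the Claim_ definition above) =====
theorem solution_spec : Claim_equal_solution := by
  intro numbers _
  unfold Spec_solution solution solution_alt
  suffices h : ∀ (l : List Int) (acc : List Int),
      l.foldl (fun answer num =>
        if num < 7 then answer ++ [num + 1]
        else
          let binN := PySem.Int.toBinChars num
          if binN = List.replicate binN.length '1' then
            answer ++ [ofBin ('1' :: '0' :: List.replicate (binN.length - 1) '1')]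
          else
            match loopA binN (binN.length - 1) with
            | some v => answer ++ [v]
            | none => answer) acc
        = acc ++ l.map (fun num =>
            if num < 7 ∨ PySem.Int.mod num 2 = 0 then num + 1
            else num + 2 ^ (trailingOnes num.toNat - 1)) by
    simpa using h numbers []
  intro l
  induction l with
  | nil => intro acc; simp
  | cons x xs ih =>
      intro acc
      simp only [List.foldl_cons, List.map_cons]
      rw [step_eq acc x, ih, List.append_assoc]
      rfl
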